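-- pv_equiv track=rewrite | github.com/nijaru/aoc | 2024/day2/src/main.py | is_valid_with_skip
-- ===== SOURCE A (Python) =====
-- def is_valid_with_skip(nums, skip_idx=-1):
--     if len(nums) - (1 if skip_idx >= 0 else 0) < 2:
--         return False
--
--     prev = None
--     is_ascending = None
--
--     for i in range(len(nums)):
--         if i == skip_idx:
--             continue
--         if prev is None:
--             prev = nums[i]
--             continue
--
--         diff = nums[i] - prev
--         if abs(diff) > 3 or diff == 0:
--             return False
--
--         if is_ascending is None:
--             is_ascending = diff > 0
--
--         if (is_ascending and diff <= 0) or (not is_ascending and diff >= 0):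
--             return False
--
--         prev = nums[i]
--
--     return True
-- ===== SOURCE B (Python) =====
-- def is_valid_with_skip(nums, skip_idx=-1):
--     if len(nums) - (1 if skip_idx >= 0 else 0) < 2:
--         return False
--     seq = [x for i, x in enumerate(nums) if i != skip_idx]
--     diffs = [b - a for a, b in zip(seq, seq[1:])]
--     return all(1 <= d <= 3 for d in diffs) or all(-3 <= d <= -1 for d in diffs)
-- ===== Notes on version B (the rewrite author's own statement) =====
-- stated objective: simpler
-- what changed: Replaces the stateful index loop tracking prev/is_ascending with declarative data flow: build the skipped sequence, take pairwise differences, and test them with two all() range checks.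
import Mathlib
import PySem

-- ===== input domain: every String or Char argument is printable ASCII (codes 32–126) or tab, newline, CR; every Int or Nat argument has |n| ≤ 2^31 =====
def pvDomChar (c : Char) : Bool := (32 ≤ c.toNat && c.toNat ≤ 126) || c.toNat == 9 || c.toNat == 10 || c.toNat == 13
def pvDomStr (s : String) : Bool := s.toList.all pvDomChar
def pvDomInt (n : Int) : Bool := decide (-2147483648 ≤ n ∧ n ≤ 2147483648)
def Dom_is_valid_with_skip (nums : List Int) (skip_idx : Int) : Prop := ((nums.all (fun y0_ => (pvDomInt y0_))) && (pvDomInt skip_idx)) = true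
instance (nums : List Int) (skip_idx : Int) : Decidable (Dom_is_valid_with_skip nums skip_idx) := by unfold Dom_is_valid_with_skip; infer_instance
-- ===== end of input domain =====

-- B replaces A's stateful prev/is_ascending index loop by building the skipped sequence,
-- its pairwise-difference list, and two all() range checks (objective: simpler).

-- ===== PORT A =====
-- the for-loop of A: state (prev, is_ascending); returning false = Python's early `return False`
def pvLoopA (nums : List Int) (skip_idx : Int) : List Int → Option Int → Option Bool → Bool
  | [], _, _ => true
  | i :: rest, prev, asc =>
    if i = skip_idx then pvLoopA nums skip_idx rest prev asc
    else
      match prev with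
      | none => pvLoopA nums skip_idx rest (some (PySem.List.pyGetD nums i 0)) asc
      | some p =>
        let diff := PySem.List.pyGetD nums i 0 - p
        if 3 < diff.natAbs ∨ diff = 0 then false
        else
          let asc' : Bool := asc.getD (decide (0 < diff))
          if (asc' && decide (diff ≤ 0)) || (!asc' && decide (0 ≤ diff)) then false
          else pvLoopA nums skip_idx rest (some (PySem.List.pyGetD nums i 0)) (some asc')

def is_valid_with_skip (nums : List Int) (skip_idx : Int) : Bool :=
  if (nums.length : Int) - (if 0 ≤ skip_idx then 1 else 0) < 2 then false
  else pvLoopA nums skip_idx (PySem.List.pyRange 0 (nums.length : Int) 1) none none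

-- ===== PORT B =====
-- seq = [x for i, x in enumerate(nums) if i != skip_idx]; diffs = pairwise differences (zip with seq[1:]);
-- valid iff all diffs in [1,3] or all in [-3,-1]
def is_valid_with_skip_alt (nums : List Int) (skip_idx : Int) : Bool :=
  if (nums.length : Int) - (if 0 ≤ skip_idx then 1 else 0) < 2 then false
  else
    (((((PySem.List.enumerate nums 0).filter (fun p => p.1 ≠ skip_idx)).map (·.2)).zip
        (PySem.List.slice (((PySem.List.enumerate nums 0).filter (fun p => p.1 ≠ skip_idx)).map (·.2)) (some 1) none)).map
          (fun p => p.2 - p.1)).all (fun d => decide (1 ≤ d) && decide (d ≤ 3)) ||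
    (((((PySem.List.enumerate nums 0).filter (fun p => p.1 ≠ skip_idx)).map (·.2)).zip
        (PySem.List.slice (((PySem.List.enumerate nums 0).filter (fun p => p.1 ≠ skip_idx)).map (·.2)) (some 1) none)).map
          (fun p => p.2 - p.1)).all (fun d => decide (-3 ≤ d) && decide (d ≤ -1))

-- ===== PRECONDITION & SPEC =====
def Spec_is_valid_with_skip (nums : List Int) (skip_idx : Int) (out : Bool) : Prop := out = is_valid_with_skip_alt nums skip_idx
instance (nums : List Int) (skip_idx : Int) (out : Bool) : Decidable (Spec_is_valid_with_skip nums skip_idx out) := by unfold Spec_is_valid_with_skip; infer_instance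

-- ===== CLAIM (what is proved, stated in full; the proofs are below) =====
def Claim_equal_is_valid_with_skip : Prop := ∀ (nums : List Int) (skip_idx : Int), Dom_is_valid_with_skip nums skip_idx → Spec_is_valid_with_skip nums skip_idx (is_valid_with_skip nums skip_idx)

-- ===== LEMMAS AND PROOFS =====

-- A's loop over values (indices resolved, skip already applied)
def pvLoopV : List Int → Option Int → Option Bool → Bool
  | [], _, _ => true
  | x :: rest, prev, asc =>
    match prev with
    | none => pvLoopV rest (some x) asc
    | some p =>
      let diff := x - p
      if 3 < diff.natAbs ∨ diff = 0 then false
      else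
        let asc' : Bool := asc.getD (decide (0 < diff))
        if (asc' && decide (diff ≤ 0)) || (!asc' && decide (0 ≤ diff)) then false
        else pvLoopV rest (some x) (some asc')

def pvDiffs (xs : List Int) : List Int := (xs.zip xs.tail).map (fun p => p.2 - p.1)

def pvAsc (d : Int) : Bool := decide (1 ≤ d) && decide (d ≤ 3)
def pvDesc (d : Int) : Bool := decide (-3 ≤ d) && decide (d ≤ -1)
def pvDir (b : Bool) (d : Int) : Bool := if b then pvAsc d else pvDesc d

lemma pvLoopA_eq_loopV (nums : List Int) (skip_idx : Int) (l : List Int)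
    (prev : Option Int) (asc : Option Bool) :
    pvLoopA nums skip_idx l prev asc
      = pvLoopV ((l.filter (fun i => i ≠ skip_idx)).map (fun i => PySem.List.pyGetD nums i 0)) prev asc := by
  induction l generalizing prev asc with
  | nil => rfl
  | cons i rest ih =>
    by_cases h : i = skip_idx
    · simp [pvLoopA, h, ih]
    · cases prev with
      | none => simp [pvLoopA, pvLoopV, h, ih]
      | some p =>
        simp only [pvLoopA, List.filter_cons, if_pos (show (decide (i ≠ skip_idx)) = true by simp [h]),
          List.map_cons, pvLoopV, if_neg h]
        split_ifs with h1 h2 <;> first | rfl | exact ih _ _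

lemma pvSeq_eq (nums : List Int) (skip_idx : Int) :
    ∀ (suffix : List Int) (s : Nat), suffix = nums.drop s →
    (((PySem.List.pyRange (s : Int) (nums.length : Int) 1).filter (fun i => i ≠ skip_idx)).map
        (fun i => PySem.List.pyGetD nums i 0))
      = ((PySem.List.enumerate suffix (s : Int)).filter (fun p => p.1 ≠ skip_idx)).map (·.2) := by
  intro suffix
  induction suffix with
  | nil =>
    intro s hs
    have hlen : nums.length ≤ s := by
      by_contra h
      have := List.drop_eq_nil_iff.mp hs.symm
      omega
    rw [PySem.List.pyRange_one_eq_nil (by exact_mod_cast hlen)]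
    simp [PySem.List.enumerate_nil]
  | cons x rest ih =>
    intro s hs
    have hlt : s < nums.length := by
      by_contra h
      rw [List.drop_eq_nil_of_le (by omega)] at hs
      exact List.cons_ne_nil x rest hs
    have hx : PySem.List.pyGetD nums (s : Int) 0 = x := by
      rw [PySem.List.pyGetD_natCast]
      have h0 : nums[s]? = some x := by
        have h := (List.getElem?_drop : (nums.drop s)[0]? = nums[s + 0]?)
        rw [← hs] at h
        simpa using h.symm
      simp [List.getD, h0]
    have hrest : rest = nums.drop (s + 1) := by
      have h1 : (nums.drop s).tail = nums.drop (s + 1) := by rw [List.tail_drop]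
      rw [← hs] at h1
      simpa using h1
    rw [PySem.List.pyRange_one_cons (by exact_mod_cast hlt), PySem.List.enumerate_cons]
    have hcast : (s : Int) + 1 = ((s + 1 : Nat) : Int) := by push_cast; ring
    rw [List.filter_cons, List.filter_cons, hcast]
    by_cases h : (s : Int) = skip_idx
    · rw [if_neg (by simp [h]), if_neg (by simp [h])]
      exact ih (s + 1) hrest
    · rw [if_pos (by simp [h]), if_pos (by simp [h]), List.map_cons, List.map_cons, hx,
        ih (s + 1) hrest]

lemma pvLoopV_some_some (xs : List Int) : ∀ (p : Int) (b : Bool),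
    pvLoopV xs (some p) (some b) = (pvDiffs (p :: xs)).all (pvDir b) := by
  induction xs with
  | nil => intro p b; simp [pvLoopV, pvDiffs]
  | cons x rest ih =>
    intro p b
    have hd : pvDiffs (p :: x :: rest) = (x - p) :: pvDiffs (x :: rest) := by simp [pvDiffs]
    rw [hd, List.all_cons]
    simp only [pvLoopV, Option.getD_some]
    split_ifs with h1 h2
    · have : pvDir b (x - p) = false := by
        cases b <;> simp [pvDir, pvAsc, pvDesc] <;> omega
      simp [this]
    · push Not at h1
      have : pvDir b (x - p) = false := by
        cases b <;> simp_all [pvDir, pvAsc, pvDesc] <;> omega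
      simp [this]
    · push Not at h1
      rw [ih]
      have : pvDir b (x - p) = true := by
        cases b <;> simp_all [pvDir, pvAsc, pvDesc] <;> omega
      simp [this]

lemma pvDir_true : pvDir true = pvAsc := by funext d; rfl
lemma pvDir_false : pvDir false = pvDesc := by funext d; rfl

lemma pvLoopV_none_none (xs : List Int) :
    pvLoopV xs none none
      = ((pvDiffs xs).all pvAsc || (pvDiffs xs).all pvDesc) := by
  cases xs with
  | nil => simp [pvLoopV, pvDiffs]
  | cons x xs =>
    cases xs with
    | nil => simp [pvLoopV, pvDiffs]
    | cons y rest =>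
      have hd : pvDiffs (x :: y :: rest) = (y - x) :: pvDiffs (y :: rest) := by simp [pvDiffs]
      show pvLoopV (y :: rest) (some x) none = _
      rw [hd]
      simp only [pvLoopV, Option.getD_none]
      split_ifs with h1 h2
      · have ha : pvAsc (y - x) = false := by simp [pvAsc]; omega
        have hb : pvDesc (y - x) = false := by simp [pvDesc]; omega
        simp [ha, hb]
      · exfalso
        rcases Bool.or_eq_true_iff.mp h2 with h | h <;>
          simp only [Bool.and_eq_true, Bool.not_eq_true', decide_eq_true_eq,
            decide_eq_false_iff_not, not_lt] at h <;> omega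
      · push Not at h1
        rw [pvLoopV_some_some]
        by_cases hpos : 0 < y - x
        · rw [show decide (0 < y - x) = true by simp only [decide_eq_true_eq]; omega, pvDir_true]
          have ha : pvAsc (y - x) = true := by simp [pvAsc]; omega
          have hb : pvDesc (y - x) = false := by simp [pvDesc]; omega
          simp [ha, hb]
        · rw [show decide (0 < y - x) = false by simp only [decide_eq_false_iff_not]; omega, pvDir_false]
          have ha : pvAsc (y - x) = false := by simp [pvAsc]; omega
          have hb : pvDesc (y - x) = true := by simp [pvDesc]; omega
          simp [ha, hb]

-- ===== VERDICT (by name: the statement is the Claim_ definition above) =====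
theorem is_valid_with_skip_spec : Claim_equal_is_valid_with_skip := by
  intro nums skip_idx _
  unfold Spec_is_valid_with_skip is_valid_with_skip is_valid_with_skip_alt
  have hseq := pvSeq_eq nums skip_idx nums 0 (by simp)
  simp only [Nat.cast_zero] at hseq
  split_ifs <;>
    first
    | rfl
    | (rw [pvLoopA_eq_loopV, hseq, pvLoopV_none_none, PySem.List.slice_from_one]
       rfl)
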